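-- pv_equiv track=rewrite | github.com/ericmerle3789/Collatz-Junction-Theorem | scripts/research/r12_algebraic_structure.py | compute_normalized_sigma
-- ===== SOURCE A (Python) =====
-- def modinv(a, m):
--     """Modular inverse of a mod m. Returns None if gcd != 1."""
--     if m == 1:
--         return 0
--     g, x, _ = _extended_gcd(a % m, m)
--     if g != 1:
--         return None
--     return x % m
--
-- def _extended_gcd(a, b):
--     """Extended Euclidean algorithm."""
--     if a == 0:
--         return b, 0, 1
--     g, x, y = _extended_gcd(b % a, a)
--     return g, y - (b // a) * x, x
--
-- def compute_normalized_sigma(A_seq, k, p):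
--     """
--     sigma(A) = corrSum(A) / 3^{k-1} mod p
--              = sum_{j=0}^{k-1} (3^{-1})^j * 2^{A_j} mod p
--              = sum_{j=0}^{k-1} g^j * 2^{A_j - j} mod p   where g = 2*3^{-1}
--
--     But let's be very careful. Starting from:
--       corrSum(A) = sum_{j=0}^{k-1} 3^{k-1-j} * 2^{A_j}
--
--     Divide by 3^{k-1}:
--       sigma(A) = sum_{j=0}^{k-1} 3^{-j} * 2^{A_j}  mod p
--
--     Now 3^{-1} mod p exists since p >= 5 (p | d, d is odd, 3 does not divide d).
--     Let inv3 = 3^{-1} mod p. Then: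
--       sigma(A) = sum_{j=0}^{k-1} inv3^j * 2^{A_j}  mod p
--
--     Let g = 2 * inv3 mod p. Then inv3 = g * modinv(2, p).
--     So inv3^j = g^j * modinv(2,p)^j. And:
--       sigma(A) = sum_{j=0}^{k-1} g^j * 2^{-j} * 2^{A_j} mod p
--                = sum_{j=0}^{k-1} g^j * 2^{A_j - j}  mod p
--
--     This is the CORRECT normalized form.
--     """
--     inv3 = modinv(3, p)
--     if inv3 is None:
--         return None
--     result = 0
--     for j in range(k):
--         aj = A_seq[j]
--         # term = inv3^j * 2^{A_j} mod p
--         term = (pow(inv3, j, p) * pow(2, aj, p)) % p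
--         result = (result + term) % p
--     return result
-- ===== SOURCE B (Python) =====
-- def modinv(a, m):
--     """Modular inverse of a mod m via the ITERATIVE extended Euclid.
--     Returns None if gcd != 1."""
--     if m == 1:
--         return 0
--     r0, r1 = m, a % m
--     x0, x1 = 0, 1
--     while r1:
--         q = r0 // r1
--         r0, r1 = r1, r0 - q * r1
--         x0, x1 = x1, x0 - q * x1
--     if r0 != 1:
--         return None
--     return x0 % m
--
-- def compute_normalized_sigma(A_seq, k, p):
--     """Two staged passes: materialize the term list pow(2, A_j, p) over the
--     prefix, then Horner's rule in inv3 back to front with one accumulator."""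
--     inv3 = modinv(3, p)
--     if inv3 is None:
--         return None
--     terms = [pow(2, a, p) for a in (A_seq[:k] if k > 0 else [])]
--     acc = 0
--     for t in reversed(terms):
--         acc = (acc * inv3 + t) % p
--     return acc
-- ===== Notes on version B (the rewrite author's own statement) =====
-- stated objective: alternative
-- what changed: B replaces the recursive extended gcd by an iterative Bezout loop inside modinv, and replaces A's indexed loop with per-term pow(inv3, j, p) by two staged passes: materialize the term list pow(2, A_j, p) over the prefix, then Horner's rule in inv3 back to front with a single multiplied accumulator, dropping the per-term modular exponentiation of inv3.
import Mathlib
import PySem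

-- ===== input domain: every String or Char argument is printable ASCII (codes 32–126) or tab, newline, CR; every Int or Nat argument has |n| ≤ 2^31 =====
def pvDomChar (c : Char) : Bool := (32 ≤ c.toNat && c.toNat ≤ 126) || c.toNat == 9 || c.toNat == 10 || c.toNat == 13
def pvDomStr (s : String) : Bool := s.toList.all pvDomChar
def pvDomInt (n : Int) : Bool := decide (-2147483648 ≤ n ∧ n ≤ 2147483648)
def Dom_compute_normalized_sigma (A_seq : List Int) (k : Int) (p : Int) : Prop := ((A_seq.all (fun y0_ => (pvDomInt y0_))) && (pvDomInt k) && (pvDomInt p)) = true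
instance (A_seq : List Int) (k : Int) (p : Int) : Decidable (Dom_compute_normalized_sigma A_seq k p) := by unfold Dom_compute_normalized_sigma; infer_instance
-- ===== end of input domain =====

-- B uses an iterative Bezout loop for modinv and evaluates the modular sum by
-- Horner's rule over a staged term list, instead of A's recursive extended gcd
-- and per-term pow(inv3, j, p) in an indexed loop.


-- ===== PORT A =====
-- _extended_gcd(a, b), step for step (Python % and // are floor-convention)
def extendedGcd (a b : Int) : Int × Int × Int :=
  if _h : a = 0 then (b, 0, 1)
  else
    let r := extendedGcd (PySem.Int.mod b a) a
    (r.1, r.2.2 - PySem.Int.floordiv b a * r.2.1, r.2.1)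
termination_by a.natAbs
decreasing_by
  rcases lt_or_gt_of_ne _h with ha | ha
  · have := PySem.Int.mod_neg_bounds b ha; omega
  · have h1 := PySem.Int.mod_nonneg b ha
    have h2 := PySem.Int.mod_lt b ha
    omega

-- modinv(a, m), step for step
def modinv (a m : Int) : Option Int :=
  if m = 1 then some 0
  else
    let r := extendedGcd (PySem.Int.mod a m) m
    if r.1 ≠ 1 then none
    else some (PySem.Int.mod r.2.1 m)

-- Python pow(b, e, m): for e < 0 Python raises the exponent's inverse mod m
-- (pow(modinv(b, m), -e, m)); exact for m > 0 with (0 ≤ e or gcd(b, m) = 1),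
-- which Pre_ guarantees on every call the admitted inputs reach.
def pyPowMod (b e m : Int) : Int :=
  if 0 ≤ e then PySem.Int.powMod b e.toNat m
  else PySem.Int.powMod ((modinv b m).getD 0) (-e).toNat m

def compute_normalized_sigma (A_seq : List Int) (k : Int) (p : Int) : Option Int :=
  match modinv 3 p with
  | none => none
  | some inv3 =>
    some ((PySem.List.pyRange 0 k 1).foldl (fun result j =>
      let aj := PySem.List.pyGetD A_seq j 0
      let term := PySem.Int.mod (pyPowMod inv3 j p * pyPowMod 2 aj p) p
      PySem.Int.mod (result + term) p) 0)

-- ===== PORT B =====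
-- iterative extended-Euclid loop: while r1: q = r0//r1; rotate (r0,r1), (x0,x1)
def egcdLoop (r0 r1 x0 x1 : Int) : Int × Int :=
  if _h : r1 = 0 then (r0, x0)
  else
    let q := PySem.Int.floordiv r0 r1
    egcdLoop r1 (r0 - q * r1) x1 (x0 - q * x1)
termination_by r1.natAbs
decreasing_by
  have hm : r0 - PySem.Int.floordiv r0 r1 * r1 = PySem.Int.mod r0 r1 := by
    have := PySem.Int.floordiv_mul_add_mod r0 r1; omega
  rw [hm]
  rcases lt_or_gt_of_ne _h with hr | hr
  · have := PySem.Int.mod_neg_bounds r0 hr; omega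
  · have h1 := PySem.Int.mod_nonneg r0 hr
    have h2 := PySem.Int.mod_lt r0 hr
    omega

-- Source B's iterative modinv
def modinvAlt (a m : Int) : Option Int :=
  if m = 1 then some 0
  else
    let r := egcdLoop m (PySem.Int.mod a m) 0 1
    if r.1 ≠ 1 then none
    else some (PySem.Int.mod r.2 m)

-- Python pow(b, e, m) for B (same builtin convention, via B's modinv)
def pyPowModB (b e m : Int) : Int :=
  if 0 ≤ e then PySem.Int.powMod b e.toNat m
  else PySem.Int.powMod ((modinvAlt b m).getD 0) (-e).toNat m

def compute_normalized_sigma_alt (A_seq : List Int) (k : Int) (p : Int) : Option Int :=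
  match modinvAlt 3 p with
  | none => none
  | some inv3 =>
    let terms := (if 0 < k then PySem.List.slice A_seq none (some k) else []).map
      (fun a => pyPowModB 2 a p)
    some (terms.reverse.foldl (fun acc t => PySem.Int.mod (acc * inv3 + t) p) 0)

-- ===== PRECONDITION & SPEC =====
-- Pre_ excludes exactly the inputs where Python A raises: p = 0 (ZeroDivisionError
-- in modinv), and — only when the loop actually runs, i.e. p ≥ 1 with gcd(3,p)=1 —
-- k beyond the list length (IndexError) or an even p with a negative exponent among
-- the first k entries (ValueError in pow). A returns a value on everything admitted.
def Pre_compute_normalized_sigma (A_seq : List Int) (k : Int) (p : Int) : Prop :=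
  p ≠ 0 ∧ ((1 ≤ p ∧ Int.gcd 3 p = 1) →
    (k ≤ (A_seq.length : Int) ∧
      (PySem.Int.mod p 2 = 0 → ∀ x ∈ A_seq.take k.toNat, 0 ≤ x)))
instance (A_seq : List Int) (k : Int) (p : Int) : Decidable (Pre_compute_normalized_sigma A_seq k p) := by unfold Pre_compute_normalized_sigma; infer_instance
def pvWitness_compute_normalized_sigma : List Int × Int × Int := ([1, 2, 3], 3, 11)
def Spec_compute_normalized_sigma (A_seq : List Int) (k : Int) (p : Int) (out : Option Int) : Prop := out = compute_normalized_sigma_alt A_seq k p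
instance (A_seq : List Int) (k : Int) (p : Int) (out : Option Int) : Decidable (Spec_compute_normalized_sigma A_seq k p out) := by unfold Spec_compute_normalized_sigma; infer_instance

-- ===== CLAIM (what is proved, stated in full; the proofs are below) =====
def Claim_equal_compute_normalized_sigma : Prop := ∀ (A_seq : List Int) (k : Int) (p : Int), Dom_compute_normalized_sigma A_seq k p → Pre_compute_normalized_sigma A_seq k p → Spec_compute_normalized_sigma A_seq k p (compute_normalized_sigma A_seq k p)

-- ===== LEMMAS AND PROOFS =====

-- B's iterative Bezout loop computes, in its second slot, the Bezout combination
-- of the RECURSIVE extended gcd of its (swapped) arguments.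
theorem egcdLoop_eq : ∀ (n : Nat) (r1 r0 x0 x1 : Int), r1.natAbs ≤ n →
    egcdLoop r0 r1 x0 x1 =
      ((extendedGcd r1 r0).1,
       x0 * (extendedGcd r1 r0).2.2 + x1 * (extendedGcd r1 r0).2.1) := by
  intro n
  induction n with
  | zero =>
    intro r1 r0 x0 x1 hn
    have h0 : r1 = 0 := by omega
    subst h0
    rw [egcdLoop, extendedGcd]; simp
  | succ m ih =>
    intro r1 r0 x0 x1 hn
    by_cases h0 : r1 = 0
    · subst h0; rw [egcdLoop, extendedGcd]; simp
    · have hm : r0 - PySem.Int.floordiv r0 r1 * r1 = PySem.Int.mod r0 r1 := by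
        have := PySem.Int.floordiv_mul_add_mod r0 r1; omega
      have hlt : (PySem.Int.mod r0 r1).natAbs ≤ m := by
        rcases lt_or_gt_of_ne h0 with hr | hr
        · have := PySem.Int.mod_neg_bounds r0 hr; omega
        · have h1 := PySem.Int.mod_nonneg r0 hr
          have h2 := PySem.Int.mod_lt r0 hr
          omega
      rw [egcdLoop]
      simp only [h0, dite_false]
      rw [hm, ih (PySem.Int.mod r0 r1) r1 x1 (x0 - PySem.Int.floordiv r0 r1 * x1) hlt]
      conv_rhs => rw [extendedGcd]
      simp only [h0, dite_false]
      exact Prod.ext rfl (by ring)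

-- hence the two modinv's agree on every input
theorem modinvAlt_eq (a m : Int) : modinvAlt a m = modinv a m := by
  unfold modinvAlt modinv
  by_cases h1 : m = 1
  · simp [h1]
  · simp only [h1, if_false]
    rw [egcdLoop_eq (PySem.Int.mod a m).natAbs (PySem.Int.mod a m) m 0 1 le_rfl]
    simp

theorem pyPowModB_eq (b e m : Int) : pyPowModB b e m = pyPowMod b e m := by
  unfold pyPowModB pyPowMod
  rw [modinvAlt_eq]

-- For a negative modulus the extended gcd's first component stays negative,
-- so modinv (hence both programs) returns none.
theorem extendedGcd_fst_neg : ∀ (n : Nat) (a b : Int), a.natAbs ≤ n → a ≤ 0 → b < 0 →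
    (extendedGcd a b).1 < 0 := by
  intro n
  induction n with
  | zero =>
    intro a b hn ha hb
    have : a = 0 := by omega
    subst this
    rw [extendedGcd]; simpa
  | succ m ih =>
    intro a b hn ha hb
    by_cases h0 : a = 0
    · subst h0; rw [extendedGcd]; simpa
    · have halt : a < 0 := lt_of_le_of_ne ha h0
      have hbd := PySem.Int.mod_neg_bounds b halt
      rw [extendedGcd]
      simp only [h0, dite_false]
      exact ih (PySem.Int.mod b a) a (by omega) (by omega) halt

theorem modinv_of_neg (a m : Int) (hm : m < 0) : modinv a m = none := by
  have hmb := PySem.Int.mod_neg_bounds a hm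
  have hg : (extendedGcd (PySem.Int.mod a m) m).1 < 0 :=
    extendedGcd_fst_neg (PySem.Int.mod a m).natAbs _ m le_rfl (by omega) hm
  rw [modinv]
  simp only [show m ≠ 1 by omega, if_false]
  simp [show (extendedGcd (PySem.Int.mod a m) m).1 ≠ 1 by omega]

-- for nonnegative a and positive b the recursive extended gcd's first slot IS the gcd
theorem extendedGcd_fst_eq_gcd : ∀ (n : Nat) (a b : Int), a.natAbs ≤ n → 0 ≤ a → 0 < b →
    (extendedGcd a b).1 = Int.gcd a b := by
  intro n
  induction n with
  | zero =>
    intro a b hn ha hb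
    have h0 : a = 0 := by omega
    subst h0
    rw [extendedGcd]
    simp
    exact (abs_of_pos hb).symm
  | succ m ih =>
    intro a b hn ha hb
    by_cases h0 : a = 0
    · subst h0
      rw [extendedGcd]
      simp
      exact (abs_of_pos hb).symm
    · have hpos : 0 < a := lt_of_le_of_ne ha (Ne.symm h0)
      have h1 := PySem.Int.mod_nonneg b hpos
      have h2 := PySem.Int.mod_lt b hpos
      rw [extendedGcd]
      simp only [h0, dite_false]
      rw [ih (PySem.Int.mod b a) a (by omega) h1 hpos]
      rw [PySem.Int.mod_eq_emod_of_pos hpos]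
      rw [Int.gcd_emod, Int.gcd_comm]

-- if modinv 3 p succeeded with p ≥ 1, then gcd(3, p) = 1 (fires Pre_'s hypothesis)
theorem gcd_one_of_modinv_some (p : Int) (hp : 0 < p) (inv3 : Int)
    (h : modinv 3 p = some inv3) : Int.gcd 3 p = 1 := by
  by_cases h1 : p = 1
  · subst h1; decide
  · rw [modinv] at h
    simp only [h1, if_false] at h
    by_cases hg : (extendedGcd (PySem.Int.mod 3 p) p).1 = 1
    · have := extendedGcd_fst_eq_gcd (PySem.Int.mod 3 p).natAbs (PySem.Int.mod 3 p) p
        le_rfl (PySem.Int.mod_nonneg 3 hp) hp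
      rw [this] at hg
      rw [PySem.Int.mod_eq_emod_of_pos hp, Int.gcd_emod] at hg
      exact_mod_cast hg
    · simp [hg] at h

-- the weighted sum both loops compute (Horner form, exact integers)
def wsum (inv3 : Int) (ts : List Int) : Int :=
  ts.foldr (fun t s => t + inv3 * s) 0

theorem wsum_append_singleton (inv3 x : Int) : ∀ (l : List Int),
    wsum inv3 (l ++ [x]) = wsum inv3 l + inv3 ^ l.length * x := by
  intro l
  induction l with
  | nil => simp [wsum]
  | cons t ts ih =>
    simp only [wsum, List.cons_append, List.foldr_cons] at ih ⊢
    rw [ih]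
    simp only [List.length_cons, pow_succ]
    ring

-- a % p ≡ a  (mod p), as Int.ModEq
theorem emod_modEq (a p : Int) : Int.ModEq p (a % p) a :=
  Int.emod_emod_of_dvd a dvd_rfl

-- A's loop: left fold over 0,…,n-1 of result ↦ (result + (inv3^j % p)*T j % p) % p
theorem foldA_eq (T : Int → Int) (inv3 p : Int) (hp : 0 < p) : ∀ n : Nat,
    ((List.range n).map Int.ofNat).foldl
      (fun result j => PySem.Int.mod (result + PySem.Int.mod (pyPowMod inv3 j p * T j) p) p) 0
    = wsum inv3 ((List.range n).map (fun i => T (Int.ofNat i))) % p := by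
  intro n
  induction n with
  | zero => simp [wsum]
  | succ m ih =>
    rw [List.range_succ]
    simp only [List.map_append, List.map_cons, List.map_nil, List.foldl_append,
      List.foldl_cons, List.foldl_nil]
    rw [ih, wsum_append_singleton]
    simp only [List.length_map, List.length_range]
    simp only [PySem.Int.mod_eq_emod_of_pos hp]
    have hpow : pyPowMod inv3 (Int.ofNat m) p = inv3 ^ m % p := by
      simp [pyPowMod, PySem.Int.powMod, PySem.Int.mod_eq_emod_of_pos hp]
    rw [hpow]
    exact ((emod_modEq (wsum inv3 ((List.range m).map fun i => T (Int.ofNat i))) p).add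
      ((emod_modEq _ p).trans ((emod_modEq (inv3 ^ m) p).mul_right _)))

-- B's loop: Horner over the reversed term list
theorem foldB_eq (inv3 p : Int) (hp : 0 < p) : ∀ (ts : List Int),
    ts.reverse.foldl (fun acc t => PySem.Int.mod (acc * inv3 + t) p) 0
    = wsum inv3 ts % p := by
  intro ts
  rw [List.foldl_reverse]
  induction ts with
  | nil => simp [wsum]
  | cons t rest ih =>
    simp only [List.foldr_cons, ih]
    simp only [PySem.Int.mod_eq_emod_of_pos hp]
    have : wsum inv3 (t :: rest) = wsum inv3 rest * inv3 + t := by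
      simp only [wsum, List.foldr_cons]; ring
    rw [this]
    exact ((emod_modEq (wsum inv3 rest) p).mul_right inv3).add (Int.ModEq.refl t)

-- the two term lists coincide on the admitted inputs
theorem termlists_eq (A_seq : List Int) (p : Int) (n : Nat) (hn : n ≤ A_seq.length) :
    (List.range n).map (fun i => pyPowMod 2 (PySem.List.pyGetD A_seq (Int.ofNat i) 0) p)
    = (A_seq.take n).map (fun a => pyPowModB 2 a p) := by
  apply List.ext_getElem
  · simp [List.length_take, hn]
  · intro i h1 h2
    simp only [List.getElem_map, List.getElem_range, List.getElem_take]
    rw [pyPowModB_eq]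
    congr 1
    have hi : i < A_seq.length := by
      simp at h1; omega
    rw [show (Int.ofNat i) = ((i : Nat) : Int) from rfl, PySem.List.pyGetD_natCast]
    exact List.getD_eq_getElem A_seq 0 hi

-- ===== VERDICT (by name: the statement is the Claim_ definition above) =====
theorem compute_normalized_sigma_spec : Claim_equal_compute_normalized_sigma := by
  intro A_seq k p _hdom hpre
  unfold Spec_compute_normalized_sigma
  obtain ⟨hp0, hrest⟩ := hpre
  unfold compute_normalized_sigma compute_normalized_sigma_alt
  rw [modinvAlt_eq]
  cases hmi : modinv 3 p with
  | none => rfl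
  | some inv3 =>
    dsimp only
    rcases lt_or_gt_of_ne hp0 with hneg | hpos
    · rw [modinv_of_neg 3 p hneg] at hmi; exact absurd hmi (by simp)
    · -- p > 0: gcd(3,p) = 1, so Pre_ yields k ≤ len
      have hk : k ≤ (A_seq.length : Int) :=
        (hrest ⟨by omega, gcd_one_of_modinv_some p hpos inv3 hmi⟩).1
      congr 1
      rw [PySem.List.pyRange_one]
      have hmap : (List.range (k - 0).toNat).map (fun m : Nat => (0 : Int) + m)
          = (List.range (k - 0).toNat).map Int.ofNat := by simp
      rw [hmap]
      rw [foldA_eq (fun j => pyPowMod 2 (PySem.List.pyGetD A_seq j 0) p) inv3 p hpos]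
      by_cases hkpos : 0 < k
      · have hslice : PySem.List.slice A_seq none (some k) = A_seq.take k.toNat :=
          PySem.List.slice_to A_seq (show (0:Int) ≤ k by omega)
        simp only [hkpos, if_true, hslice]
        rw [foldB_eq inv3 p hpos]
        have hn : k.toNat ≤ A_seq.length := by omega
        have hkk : (k - 0).toNat = k.toNat := by omega
        rw [hkk]
        congr 2
        exact termlists_eq A_seq p k.toNat hn
      · simp only [hkpos, if_false]
        rw [foldB_eq inv3 p hpos]
        rw [show (k - 0).toNat = 0 from by omega]
        simp
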